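-- pv_equiv track=rewrite | github.com/doongidoong/PS_algo | programmers/토스01.py | solution
-- ===== SOURCE A (Python) =====
-- def solution(s):
--     answer =0
--     L= [ 0 for _ in range(10)]
--     now=1
--     flag=0
--     for i in range(1,len(s)):
--         k=s[i]
--         if s[i] ==s[i-1]:
--             now+=1
--             if now==3:
--                 L[int(k)]=int(k)
--                 now=1
--                 flag =1
--         else:
--             now= 1
--     if flag== 0:
--         answer = -1
--     else:
--         answer= int(str(max(L))*3)
--     return answer
-- ===== SOURCE B (Python) =====
-- def solution(s):
--     # Two-phase: build the run-length encoding, then reduce over runs of length >= 3.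
--     runs = []
--     cur = None
--     cnt = 0
--     for ch in s:
--         if ch == cur:
--             cnt += 1
--         else:
--             if cur is not None:
--                 runs.append((cur, cnt))
--             cur = ch
--             cnt = 1
--     if cur is not None:
--         runs.append((cur, cnt))
--     triples = [int(ch) for ch, n in runs if n >= 3]
--     if not triples:
--         return -1
--     return int(str(max(triples)) * 3)
-- ===== Notes on version B (the rewrite author's own statement) =====
-- stated objective: alternative
-- what changed: A's fused single state machine (incremental run counter, flag, and a 10-slot bucket array indexed and filled with the digit value, finished by a max over the array) is replaced by a two-phase pipeline: materialize the run-length encoding of s, then filter the runs of length at least 3, convert their digits, and take the max of that list (empty means -1).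
-- outside the precondition, e.g. on solution('aaa'): A raises ValueError, B raises ValueError
import Mathlib
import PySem

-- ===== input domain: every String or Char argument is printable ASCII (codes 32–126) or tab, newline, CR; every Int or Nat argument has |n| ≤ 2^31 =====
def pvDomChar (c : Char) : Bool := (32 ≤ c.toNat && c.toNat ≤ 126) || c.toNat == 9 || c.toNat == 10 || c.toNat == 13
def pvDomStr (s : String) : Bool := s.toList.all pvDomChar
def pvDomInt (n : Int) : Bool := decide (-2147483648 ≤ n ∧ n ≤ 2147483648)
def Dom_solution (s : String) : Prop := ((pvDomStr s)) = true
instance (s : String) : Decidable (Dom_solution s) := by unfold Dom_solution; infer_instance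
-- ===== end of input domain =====

-- B replaces A's fused run-counter/flag/bucket-array state machine by a two-phase
-- "materialize the run-length encoding, then reduce over runs of length >= 3" (alternative
-- decomposition, same O(n) cost).

-- ===== PORT A =====
-- The index loop over range(1, len(s)) reads each character together with its
-- predecessor; it is transcribed as the structural recursion over the tail that carries
-- the previous character, with the same state (L, now, flag) and the same branch order.
-- Converting a non-digit character to an integer raises ValueError in Python
-- (PySem.Int.ofChars? = none); those inputs are excluded by Pre_solution, so the
-- .getD 0 default value is never relied upon.
def solutionLoop (prev : Char) (l : List Char) (L : List Int) (now flag : Int) :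
    List Int × Int × Int :=
  match l with
  | [] => (L, now, flag)
  | k :: rest =>
    if k = prev then
      if now + 1 = 3 then
        let d := (PySem.Int.ofChars? [k]).getD 0
        solutionLoop k rest (L.set d.toNat d) 1 1
      else
        solutionLoop k rest L (now + 1) flag
    else
      solutionLoop k rest L 1 flag

def solution (s : String) : Int :=
  let L0 : List Int := (List.range 10).map (fun _ => (0 : Int))
  let st :=
    match s.toList with
    | [] => (L0, (1 : Int), (0 : Int))
    | h :: t => solutionLoop h t L0 1 0
  if st.2.2 = 0 then -1
  else
    (PySem.Int.ofChars?
      (PySem.List.pyRepeat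
        (PySem.Int.toChars ((PySem.List.max? st.1 (fun x => x)).getD 0)) 3)).getD 0

-- ===== PORT B =====
-- Port of Source B: one pass building the run-length encoding (state: finished runs, current
-- char, current count), flush the last run, then filter/map/max over the runs.
def runStep (st : List (Char × Int) × Option Char × Int) (ch : Char) :
    List (Char × Int) × Option Char × Int :=
  match st with
  | (runs, some c, n) =>
    if ch = c then (runs, some c, n + 1) else (runs ++ [(c, n)], some ch, 1)
  | (runs, none, _) => (runs, some ch, 1)

def buildRuns (l : List Char) : List (Char × Int) :=
  match l.foldl runStep ([], none, 0) with
  | (runs, some c, n) => runs ++ [(c, n)]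
  | (runs, none, _) => runs

def solution_alt (s : String) : Int :=
  let runs := buildRuns s.toList
  let triples := (runs.filter (fun p => decide ((3 : Int) ≤ p.2))).map
    (fun p => (PySem.Int.ofChars? [p.1]).getD 0)
  match PySem.List.max? triples (fun x => x) with
  | none => -1
  | some m =>
    (PySem.Int.ofChars? (PySem.List.pyRepeat (PySem.Int.toChars m) 3)).getD 0

-- ===== PRECONDITION & SPEC =====
-- Pre_ excludes exactly the inputs on which A raises ValueError: some non-digit
-- character occurs three times in a row and is converted to an integer.  B raises
-- ValueError on the same inputs.
def Pre_solution (s : String) : Prop :=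
  ∀ i < s.toList.length, i + 2 < s.toList.length →
    s.toList.getD i ' ' = s.toList.getD (i + 1) ' ' →
    s.toList.getD (i + 1) ' ' = s.toList.getD (i + 2) ' ' →
    (s.toList.getD i ' ').isDigit = true
instance (s : String) : Decidable (Pre_solution s) := by unfold Pre_solution; infer_instance

def pvWitness_solution : String := "000"

def Spec_solution (s : String) (out : Int) : Prop := out = solution_alt s
instance (s : String) (out : Int) : Decidable (Spec_solution s out) := by
  unfold Spec_solution; infer_instance

-- ===== CLAIM (what is proved, stated in full; the proofs are below) =====
def Claim_equal_solution : Prop :=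
  ∀ (s : String), Dom_solution s → Pre_solution s → Spec_solution s (solution s)

-- ===== LEMMAS AND PROOFS =====

-- int(k) for a one-character string k, as the ports compute it
def intC (c : Char) : Int := (PySem.Int.ofChars? [c]).getD 0
-- the array update A performs on a trigger
def updL (L : List Int) (c : Char) : List Int := L.set (intC c).toNat (intC c)
-- the sequence of characters on which A's loop triggers (now hits 3)
def trig (p : Char) (now : Int) : List Char → List Char
  | [] => []
  | k :: rest =>
    if k = p then
      if now + 1 = 3 then k :: trig k 1 rest else trig k (now + 1) rest
    else trig k 1 rest
-- run-length encoding by forward recursion (proof-side view of buildRuns)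
def rleAux (c : Char) (n : Int) : List Char → List (Char × Int)
  | [] => [(c, n)]
  | x :: xs => if x = c then rleAux c (n + 1) xs else (c, n) :: rleAux x 1 xs

lemma solutionLoop_fst (l : List Char) : ∀ p L now flag,
    (solutionLoop p l L now flag).1 = (trig p now l).foldl updL L := by
  induction l with
  | nil => intro p L now flag; simp [solutionLoop, trig]
  | cons k rest ih =>
    intro p L now flag
    by_cases hk : k = p
    · by_cases h3 : now + 1 = 3
      · simp only [solutionLoop, trig, hk, h3, if_pos]
        rw [ih]; rfl
      · simp only [solutionLoop, trig, hk, h3, if_true, ite_false]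
        exact ih _ _ _ _
    · simp only [solutionLoop, trig, hk, if_false]
      exact ih _ _ _ _

lemma solutionLoop_flag (l : List Char) : ∀ p L now flag,
    (solutionLoop p l L now flag).2.2 = if trig p now l = [] then flag else 1 := by
  induction l with
  | nil => intro p L now flag; simp [solutionLoop, trig]
  | cons k rest ih =>
    intro p L now flag
    by_cases hk : k = p
    · by_cases h3 : now + 1 = 3
      · simp only [solutionLoop, trig, hk, h3, if_pos]
        rw [ih]; simp
      · simp only [solutionLoop, trig, hk, h3, if_true, ite_false]
        exact ih _ _ _ _
    · simp only [solutionLoop, trig, hk, if_false]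
      exact ih _ _ _ _

lemma foldl_runStep (l : List Char) : ∀ runs c n,
    (match l.foldl runStep (runs, some c, n) with
     | (rs, some c', n') => rs ++ [(c', n')]
     | (rs, none, _) => rs) = runs ++ rleAux c n l := by
  induction l with
  | nil => intro runs c n; simp [rleAux]
  | cons x xs ih =>
    intro runs c n
    by_cases hx : x = c
    · simp only [List.foldl_cons, runStep, hx, if_pos, rleAux]
      exact ih _ _ _
    · simp only [List.foldl_cons, runStep, hx, if_false, rleAux]
      rw [ih]; simp

lemma buildRuns_cons (h : Char) (t : List Char) : buildRuns (h :: t) = rleAux h 1 t := by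
  have := foldl_runStep t [] h 1
  simpa [buildRuns, runStep] using this

def thresh (n : Nat) : Nat := if n < 3 then 3 else if n % 2 = 1 then n + 2 else n + 1

def trigPred (n : Nat) (runs : List (Char × Int)) (x : Char) : Prop :=
  match runs with
  | [] => False
  | (c0, m) :: rest => (x = c0 ∧ (thresh n : Int) ≤ m) ∨ (∃ m', (x, m') ∈ rest ∧ 3 ≤ m')

lemma rleAux_head (l : List Char) : ∀ c (n : Int),
    ∃ m rest, rleAux c n l = (c, m) :: rest ∧ n ≤ m := by
  induction l with
  | nil => intro c n; exact ⟨n, [], rfl, le_refl _⟩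
  | cons x xs ih =>
    intro c n
    by_cases hx : x = c
    · obtain ⟨m, rest, he, hle⟩ := ih c (n + 1)
      exact ⟨m, rest, by simpa [rleAux, hx] using he, by omega⟩
    · exact ⟨n, rleAux x 1 xs, by simp [rleAux, hx], le_refl _⟩

lemma trigPred_one (runs : List (Char × Int)) (x : Char) :
    trigPred 1 runs x ↔ ∃ m, (x, m) ∈ runs ∧ (3 : Int) ≤ m := by
  cases runs with
  | nil => simp [trigPred]
  | cons p rest =>
    obtain ⟨c0, m⟩ := p
    have h1 : ((thresh 1 : Nat) : Int) = 3 := by norm_num [thresh]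
    simp only [trigPred, h1, List.mem_cons]
    constructor
    · rintro (⟨rfl, h⟩ | ⟨m', hm', h3⟩)
      · exact ⟨m, Or.inl rfl, h⟩
      · exact ⟨m', Or.inr hm', h3⟩
    · rintro ⟨m', hm' | hm', h3⟩
      · injection hm' with h1 h2; subst h1; subst h2; exact Or.inl ⟨rfl, h3⟩
      · exact Or.inr ⟨m', hm', h3⟩

lemma bridge (l : List Char) : ∀ (c : Char) (n : Nat), 1 ≤ n → ∀ x : Char,
    (x ∈ trig c (((n : Int) - 1) % 2 + 1) l ↔ trigPred n (rleAux c (n : Int) l) x) := by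
  induction l with
  | nil =>
    intro c n hn x
    have hth : (n : Int) < (thresh n : Int) := by
      unfold thresh; split_ifs <;> push_cast <;> omega
    simp only [trig, rleAux, trigPred, false_iff, List.mem_nil_iff]
    rintro (⟨-, h⟩ | ⟨m', hm', -⟩)
    · omega
    · simp at hm'
  | cons x0 xs ih =>
    intro c n hn x
    by_cases hx0 : x0 = c
    · subst hx0
      rcases Nat.even_or_odd n with he | ho
      · -- n even: the counter hits 3, a trigger fires
        have he' : n % 2 = 0 := Nat.even_iff.1 he
        have hnow : ((n : Int) - 1) % 2 + 1 + 1 = 3 := by omega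
        have hnow' : ((((n + 1 : Nat)) : Int) - 1) % 2 + 1 = 1 := by push_cast; omega
        have hih := ih x0 (n + 1) (by omega) x
        rw [hnow'] at hih
        obtain ⟨m, rest, hr, hm⟩ := rleAux_head xs x0 ((n : Int) + 1)
        have hr' : rleAux x0 (n : Int) (x0 :: xs) = (x0, m) :: rest := by
          simp only [rleAux, if_pos]; exact_mod_cast hr
        have hth : ((thresh n : Nat) : Int) ≤ m := by
          unfold thresh; split_ifs <;> push_cast <;> omega
        push_cast at hih
        rw [hr] at hih
        simp only [trig, hnow, if_true, List.mem_cons]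
        rw [hih, hr']
        simp only [trigPred]
        constructor
        · rintro (rfl | (⟨rfl, -⟩ | hE))
          · exact Or.inl ⟨rfl, hth⟩
          · exact Or.inl ⟨rfl, hth⟩
          · exact Or.inr hE
        · rintro (⟨rfl, -⟩ | hE)
          · exact Or.inl rfl
          · exact Or.inr (Or.inr hE)
      · -- n odd: no trigger, the counter moves to 2
        have ho' : n % 2 = 1 := Nat.odd_iff.1 ho
        have hnow : ¬(((n : Int) - 1) % 2 + 1 + 1 = 3) := by omega
        have hnow' : ((((n + 1 : Nat)) : Int) - 1) % 2 + 1 = ((n : Int) - 1) % 2 + 1 + 1 := by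
          push_cast; omega
        have hih := ih x0 (n + 1) (by omega) x
        rw [hnow'] at hih
        obtain ⟨m, rest, hr, hm⟩ := rleAux_head xs x0 ((n : Int) + 1)
        have hr' : rleAux x0 (n : Int) (x0 :: xs) = (x0, m) :: rest := by
          simp only [rleAux, if_pos]; exact_mod_cast hr
        have hth : thresh n = thresh (n + 1) := by unfold thresh; split_ifs <;> omega
        push_cast at hih
        rw [hr] at hih
        simp only [trig, if_true, if_neg hnow]
        rw [hih, hr']
        simp only [trigPred, hth]
    · -- run break: a new run of x0 starts with count 1
      have hth : (n : Int) < (thresh n : Int) := by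
        unfold thresh; split_ifs <;> push_cast <;> omega
      have hih := ih x0 1 (le_refl 1) x
      norm_num at hih
      simp only [trig, rleAux, if_neg hx0, trigPred]
      rw [hih, trigPred_one]
      constructor
      · intro h; exact Or.inr h
      · rintro (⟨-, h⟩ | hE)
        · omega
        · exact hE

lemma memTrig (h : Char) (t : List Char) (x : Char) :
    x ∈ trig h 1 t ↔ ∃ m, (x, m) ∈ rleAux h 1 t ∧ (3 : Int) ≤ m := by
  have hb := bridge t h 1 (le_refl 1) x
  norm_num at hb
  rw [hb, trigPred_one]

lemma trig_infix (l : List Char) : ∀ p : Char,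
    (∀ c, c ∈ trig p 1 l → [c, c, c] <:+: (p :: l)) ∧
    (∀ c, c ∈ trig p 2 l → [c, c, c] <:+: (p :: p :: l)) := by
  induction l with
  | nil => intro p; constructor <;> intro c hc <;> simp [trig] at hc
  | cons x xs ih =>
    intro p
    constructor
    · intro c hc
      by_cases hx : x = p
      · subst hx
        rw [show trig x 1 (x :: xs) = trig x 2 xs by simp [trig]] at hc
        exact (ih x).2 c hc
      · simp only [trig, if_neg hx] at hc
        exact List.infix_cons ((ih x).1 c hc)
    · intro c hc
      by_cases hx : x = p
      · subst hx
        simp only [trig, show (2 : Int) + 1 = 3 by norm_num, if_pos,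
          List.mem_cons] at hc
        rcases hc with rfl | hc
        · exact ⟨[], xs, rfl⟩
        · exact List.infix_cons (List.infix_cons ((ih x).1 c hc))
      · simp only [trig, if_neg hx] at hc
        exact List.infix_cons (List.infix_cons ((ih x).1 c hc))

lemma intC_digit_bounds (c : Char) (h : c.isDigit = true) : 0 ≤ intC c ∧ intC c ≤ 9 := by
  have hb : 48 ≤ c.toNat ∧ c.toNat ≤ 57 := by
    simp only [Char.isDigit, Bool.and_eq_true, decide_eq_true_eq] at h
    exact ⟨h.1, h.2⟩
  have h10 : c.toNat = 48 ∨ c.toNat = 49 ∨ c.toNat = 50 ∨ c.toNat = 51 ∨ c.toNat = 52 ∨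
      c.toNat = 53 ∨ c.toNat = 54 ∨ c.toNat = 55 ∨ c.toNat = 56 ∨ c.toNat = 57 := by omega
  rcases h10 with h'|h'|h'|h'|h'|h'|h'|h'|h'|h' <;>
    (have hc := Char.ofNat_toNat c; rw [h'] at hc; rw [← hc]; decide)

lemma max?_id_eq (l : List Int) (m : Int) (hm : m ∈ l) (hle : ∀ y ∈ l, y ≤ m) :
    PySem.List.max? l (fun x => x) = some m := by
  cases hmax : PySem.List.max? l (fun x => x) with
  | none =>
    rw [PySem.List.max?_eq_none_iff] at hmax
    subst hmax; simp at hm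
  | some m' =>
    have h1 : m' ∈ l := PySem.List.max?_mem hmax
    have h2 : ∀ y ∈ l, y ≤ m' := PySem.List.max?_isMax hmax
    have : m' = m := le_antisymm (hle _ h1) (h2 _ hm)
    rw [this]


lemma append_getD (l₁ l₂ : List Char) (k : Nat) (d : Char) :
    (l₁ ++ l₂).getD (l₁.length + k) d = l₂.getD k d := by
  simp [List.getD, List.getElem?_append_right]

lemma pre_infix (s : String) (hpre : Pre_solution s) :
    ∀ c : Char, [c, c, c] <:+: s.toList → c.isDigit = true := by
  intro c hinf
  obtain ⟨s₁, t₁, he⟩ := hinf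
  have hassoc : s₁ ++ [c, c, c] ++ t₁ = s₁ ++ ([c, c, c] ++ t₁) := by
    rw [List.append_assoc]
  have hlen : s.toList.length = s₁.length + (3 + t₁.length) := by
    rw [← he, hassoc]; simp; omega
  have hk : ∀ k, s.toList.getD (s₁.length + k) ' ' = ([c, c, c] ++ t₁).getD k ' ' := by
    intro k; rw [← he, hassoc, append_getD]
  have h0 := hk 0
  have h1 := hk 1
  have h2 := hk 2
  simp only [Nat.add_zero] at h0
  have := hpre s₁.length (by omega) (by omega)
    (by rw [h0, h1]; rfl) (by rw [h1, h2]; rfl)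
  rw [h0] at this
  exact this

lemma getD_set_self (l : List Int) (i : Nat) (a d : Int) (h : i < l.length) :
    (l.set i a).getD i d = a := by
  rw [List.getD_eq_getElem _ _ (by simpa using h)]
  simp

lemma getD_set_ne (l : List Int) (i j : Nat) (a d : Int) (h : i ≠ j) :
    (l.set i a).getD j d = l.getD j d := by
  simp [List.getD, List.getElem?_set_ne h]

lemma len_updFold (cs : List Char) : ∀ L : List Int, (cs.foldl updL L).length = L.length := by
  induction cs with
  | nil => intro L; rfl
  | cons c cs ih => intro L; rw [List.foldl_cons, ih]; simp [updL]

lemma mem_updFold (cs : List Char) : ∀ (L : List Int) (y : Int),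
    y ∈ cs.foldl updL L → y ∈ L ∨ ∃ c ∈ cs, y = intC c := by
  induction cs with
  | nil => intro L y hy; exact Or.inl hy
  | cons c cs ih =>
    intro L y hy
    rcases ih _ y hy with hL | ⟨c', hc', rfl⟩
    · rcases List.mem_or_eq_of_mem_set hL with h | h
      · exact Or.inl h
      · exact Or.inr ⟨c, List.mem_cons_self .., h⟩
    · exact Or.inr ⟨c', List.mem_cons_of_mem _ hc', rfl⟩

lemma stable_updFold (cs : List Char) : ∀ (L : List Int) (j : Nat), j < L.length →
    (∀ c ∈ cs, 0 ≤ intC c) → L.getD j 0 = (j : Int) →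
    (cs.foldl updL L).getD j 0 = (j : Int) := by
  induction cs with
  | nil => intro L j _ _ hL; exact hL
  | cons c cs ih =>
    intro L j hj h0 hL
    rw [List.foldl_cons]
    have hlen : (updL L c).length = L.length := by simp [updL]
    apply ih _ j (by omega) (fun c' hc' => h0 c' (List.mem_cons_of_mem _ hc'))
    by_cases he : (intC c).toNat = j
    · have h0c : 0 ≤ intC c := h0 c (List.mem_cons_self ..)
      have : intC c = (j : Int) := by omega
      rw [updL, he, getD_set_self _ _ _ _ (by omega), this]
    · rw [updL, getD_set_ne _ _ _ _ _ he, hL]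

lemma getD_fold_mem (cs : List Char) : ∀ (L : List Int) (c : Char), c ∈ cs →
    (∀ c' ∈ cs, 0 ≤ intC c' ∧ intC c' ≤ 9) → L.length = 10 →
    (cs.foldl updL L).getD (intC c).toNat 0 = intC c := by
  induction cs with
  | nil => intro L c hc; exact absurd hc (List.not_mem_nil)
  | cons c0 cs ih =>
    intro L c hc hall hlen
    rw [List.foldl_cons]
    have hb0 := hall c0 (List.mem_cons_self ..)
    have hlen' : (updL L c0).length = 10 := by simp [updL, hlen]
    rcases List.mem_cons.1 hc with rfl | hc'
    · have hidx : (intC c).toNat < 10 := by omega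
      have hval : ((intC c).toNat : Int) = intC c := by omega
      have hset : (updL L c).getD (intC c).toNat 0 = intC c := by
        rw [updL, getD_set_self _ _ _ _ (by omega)]
      have hst := stable_updFold cs (updL L c) (intC c).toNat (by omega)
        (fun c' hc' => (hall c' (List.mem_cons_of_mem _ hc')).1) (by rw [hset, hval])
      rw [hst, hval]
    · exact ih _ c hc' (fun c' hc'' => hall c' (List.mem_cons_of_mem _ hc'')) hlen'

-- ===== VERDICT (by name: the statement is the Claim_ definition above) =====
theorem solution_spec : Claim_equal_solution := by
  unfold Claim_equal_solution
  intro s _ hpre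
  unfold Spec_solution
  cases hl : s.toList with
  | nil =>
    simp [solution, solution_alt, hl, buildRuns, PySem.List.max?]
  | cons h t =>
    have hdig : ∀ c ∈ trig h 1 t, c.isDigit = true := by
      intro c hc
      have hinf : [c, c, c] <:+: (h :: t) := (trig_infix t h).1 c hc
      rw [← hl] at hinf
      exact pre_infix s hpre c hinf
    have hbnd : ∀ c ∈ trig h 1 t, 0 ≤ intC c ∧ intC c ≤ 9 :=
      fun c hc => intC_digit_bounds c (hdig c hc)
    have hmemB : ∀ p : Char × Int,
        p ∈ (rleAux h 1 t).filter (fun p => decide ((3 : Int) ≤ p.2)) → p.1 ∈ trig h 1 t := by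
      intro p hp
      rw [List.mem_filter] at hp
      exact (memTrig h t p.1).2 ⟨p.2, by simpa using hp.1, by simpa using hp.2⟩
    by_cases hcs : trig h 1 t = []
    · have hfilter : (rleAux h 1 t).filter (fun p => decide ((3 : Int) ≤ p.2)) = [] := by
        rw [List.filter_eq_nil_iff]
        intro p hp hdec
        have : p.1 ∈ trig h 1 t := hmemB p (List.mem_filter.2 ⟨hp, hdec⟩)
        rw [hcs] at this
        exact List.not_mem_nil this
      simp only [solution, solution_alt, hl, buildRuns_cons, hfilter]
      rw [solutionLoop_flag]
      simp only [hcs, if_pos]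
      simp [PySem.List.max?]
    · set Mv : Int := ((trig h 1 t).map intC).foldl max 0 with hMvdef
      have hMv0 : 0 ≤ Mv := (PySem.List.le_foldl_max _ 0).1
      have hub : ∀ y ∈ (trig h 1 t).map intC, y ≤ Mv := (PySem.List.le_foldl_max _ 0).2
      have hMvmem : ∃ c ∈ trig h 1 t, intC c = Mv := by
        rcases PySem.List.foldl_max_mem ((trig h 1 t).map intC) 0 with h0 | hm
        · obtain ⟨c0, hc0⟩ := List.exists_mem_of_ne_nil _ hcs
          have h1 : intC c0 ≤ Mv := hub _ (List.mem_map_of_mem hc0)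
          have h2 : 0 ≤ intC c0 := (hbnd c0 hc0).1
          exact ⟨c0, hc0, by omega⟩
        · rcases List.mem_map.1 hm with ⟨c0, hc0, he⟩
          exact ⟨c0, hc0, he⟩
      have hlenL : ((trig h 1 t).foldl updL ((List.range 10).map fun _ => (0 : Int))).length
          = 10 := by rw [len_updFold, List.length_map, List.length_range]
      have hmaxA : PySem.List.max?
          ((trig h 1 t).foldl updL ((List.range 10).map fun _ => (0 : Int)))
          (fun x => x) = some Mv := by
        apply max?_id_eq
        · obtain ⟨c0, hc0, hce⟩ := hMvmem
          have hg := getD_fold_mem (trig h 1 t) ((List.range 10).map fun _ => (0 : Int)) c0 hc0 hbnd (by rw [List.length_map, List.length_range])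
          have hidx : (intC c0).toNat < 10 := by have := hbnd c0 hc0; omega
          rw [List.getD_eq_getElem _ _ (by rw [hlenL]; exact hidx)] at hg
          rw [← hce, ← hg]
          exact List.getElem_mem _
        · intro y hy
          rcases mem_updFold _ _ y hy with hL | ⟨c', hc', rfl⟩
          · rcases List.mem_map.1 hL with ⟨_, _, rfl⟩
            exact hMv0
          · exact hub _ (List.mem_map_of_mem hc')
      have hmaxB : PySem.List.max?
          (((rleAux h 1 t).filter (fun p => decide ((3 : Int) ≤ p.2))).map
            (fun p => (PySem.Int.ofChars? [p.1]).getD 0)) (fun x => x) = some Mv := by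
        apply max?_id_eq
        · obtain ⟨c0, hc0, hce⟩ := hMvmem
          obtain ⟨m, hmem, h3⟩ := (memTrig h t c0).1 hc0
          exact List.mem_map.2 ⟨(c0, m), List.mem_filter.2 ⟨hmem, by simpa using h3⟩, hce⟩
        · intro y hy
          rcases List.mem_map.1 hy with ⟨p, hp, rfl⟩
          exact hub _ (List.mem_map_of_mem (hmemB p hp))
      simp only [solution, solution_alt, hl, buildRuns_cons]
      rw [solutionLoop_flag, solutionLoop_fst, hmaxA, hmaxB]
      simp only [if_neg hcs]
      norm_num
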